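-- pv_equiv track=rewrite | github.com/DigitalHallucinations/forgewire-fabric | python/forgewire/hub/_router.py | glob_static_prefix
-- ===== SOURCE A (Python) =====
-- def glob_static_prefix(glob: str) -> str:
--     """Return the leading wildcard-free directory prefix of a glob."""
--     norm = glob.replace("\\", "/")
--     cut = len(norm)
--     for ch in ("*", "?", "["):
--         idx = norm.find(ch)
--         if idx != -1 and idx < cut:
--             cut = idx
--     head = norm[:cut]
--     if "/" in head:
--         head = head.rsplit("/", 1)[0] + "/"
--     else:
--         head = ""
--     return head
-- ===== SOURCE B (Python) =====
-- def glob_static_prefix(glob: str) -> str: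
--     """Single left-to-right pass: emit completed wildcard-free segments; stop at the first wildcard; the trailing partial segment is never emitted."""
--     prefix = []   # confirmed output chars, always ending in '/' (or empty)
--     cur = []      # chars of the segment currently being read
--     for ch in glob:
--         if ch == '\\' or ch == '/':
--             prefix += cur
--             prefix.append('/')
--             cur = []
--         elif ch == '*' or ch == '?' or ch == '[':
--             break
--         else:
--             cur.append(ch)
--     return ''.join(prefix)
-- ===== Notes on version B (the rewrite author's own statement) =====
-- stated objective: alternative
-- what changed: Replaced the replace/three-global-find-scans/slice/rsplit pipeline with a single left-to-right pass over the characters that emits completed wildcard-free segments and stops at the first wildcard.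
import Mathlib
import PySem

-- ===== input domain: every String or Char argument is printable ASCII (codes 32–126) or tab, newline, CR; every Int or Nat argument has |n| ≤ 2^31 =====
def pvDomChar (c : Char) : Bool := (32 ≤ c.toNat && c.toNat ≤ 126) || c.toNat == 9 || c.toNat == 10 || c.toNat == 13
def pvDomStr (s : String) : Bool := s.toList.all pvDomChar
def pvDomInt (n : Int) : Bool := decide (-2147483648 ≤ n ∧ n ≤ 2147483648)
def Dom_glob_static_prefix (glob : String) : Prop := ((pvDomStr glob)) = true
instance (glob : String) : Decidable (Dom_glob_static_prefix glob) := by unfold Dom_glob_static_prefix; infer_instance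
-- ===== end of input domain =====

-- B replaces A's replace / three global find scans / slice / rsplit pipeline with a single
-- left-to-right pass that emits completed wildcard-free segments and stops at the first wildcard.

-- ===== PORT A =====
def glob_static_prefix (glob : String) : String :=
  let norm := PySem.Str.replace glob "\\" "/"
  let cut := (["*", "?", "["] : List String).foldl
    (fun cut ch =>
      let idx := PySem.Str.find norm ch
      if idx ≠ -1 ∧ idx < cut then idx else cut)
    (PySem.Str.len norm)
  let head := PySem.Str.slice norm none (some cut)
  if PySem.Str.isIn "/" head then
    -- hand port of head.rsplit("/", 1)[0] + "/": exact whenever "/" occurs in head,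
    -- which the guard above guarantees
    String.ofList ((((head.toList.reverse.dropWhile (· ≠ '/'))).tail).reverse ++ ['/'])
  else ""

-- ===== PORT B =====
-- the loop of Source B: pre = confirmed output, cur = segment currently being read
def pvAltLoop : List Char → List Char → List Char → List Char
  | [], pre, _ => pre
  | c :: rest, pre, cur =>
    if c = '\\' ∨ c = '/' then pvAltLoop rest (pre ++ cur ++ ['/']) []
    else if c = '*' ∨ c = '?' ∨ c = '[' then pre
    else pvAltLoop rest pre (cur ++ [c])

def glob_static_prefix_alt (glob : String) : String :=
  String.ofList (pvAltLoop glob.toList [] [])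

-- ===== PRECONDITION & SPEC =====
def Spec_glob_static_prefix (glob : String) (out : String) : Prop := out = glob_static_prefix_alt glob
instance (glob : String) (out : String) : Decidable (Spec_glob_static_prefix glob out) := by unfold Spec_glob_static_prefix; infer_instance

-- ===== CLAIM (what is proved, stated in full; the proofs are below) =====
def Claim_equal_glob_static_prefix : Prop := ∀ (glob : String), Dom_glob_static_prefix glob → Spec_glob_static_prefix glob (glob_static_prefix glob)

-- ===== LEMMAS AND PROOFS =====

def pvNrm (c : Char) : Char := if c = '\\' then '/' else c

def pvWild (c : Char) : Bool := c = '*' || c = '?' || c = '['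

theorem pv_replace_go_map (l : List Char) : ∀ (fuel : Nat) (acc : List Char),
    l.length ≤ fuel →
    PySem.Chars.replace.go ['\\'] ['/'] fuel l acc = acc.reverse ++ l.map pvNrm := by
  induction l with
  | nil => intro fuel acc _; cases fuel <;> simp [PySem.Chars.replace.go]
  | cons c t ih =>
    intro fuel acc h
    cases fuel with
    | zero => simp at h
    | succ f =>
      simp only [PySem.Chars.replace.go]
      by_cases hc : c = '\\'
      · subst hc
        rw [if_pos (by simp [List.isPrefixOf])]
        simp only [List.length_cons, List.length_nil, List.drop_succ_cons, List.drop_zero]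
        rw [ih f _ (by simpa using h)]
        simp [pvNrm]
      · rw [if_neg (by simp [List.isPrefixOf]; exact fun h => absurd h.symm hc)]
        rw [ih f _ (by simpa using Nat.le_of_succ_le_succ h)]
        simp [pvNrm, hc]

theorem pv_replace_map (cs : List Char) :
    PySem.Chars.replace cs ['\\'] ['/'] = cs.map pvNrm := by
  simp [PySem.Chars.replace, pv_replace_go_map cs cs.length [] le_rfl]

theorem pv_find_singleton (cs : List Char) (c : Char) :
    PySem.Chars.find cs [c] =
      if c ∈ cs then ((cs.findIdx (· = c) : Nat) : Int) else -1 := by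
  by_cases hm : c ∈ cs
  · rw [if_pos hm]
    have hnn : 0 ≤ PySem.Chars.find cs [c] :=
      (PySem.Chars.find_nonneg_iff cs [c]).mpr ((List.singleton_infix_iff c cs).mpr hm)
    obtain ⟨hpre, hmin⟩ := PySem.Chars.find_spec hnn
    set k := (PySem.Chars.find cs [c]).toNat with hk
    -- [c] <+: cs.drop k means (cs.drop k).head? = some c
    have hhead : (cs.drop k).head? = some c := by
      rcases hpre with ⟨t, ht⟩
      rw [← ht]; rfl
    have hklt : k < cs.length := by
      by_contra hge
      rw [List.drop_eq_nil_of_le (Nat.le_of_not_lt hge)] at hhead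
      simp at hhead
    have hck : cs[k] = c := by
      rwa [List.head?_drop, List.getElem?_eq_getElem hklt, Option.some_inj] at hhead
    have hne : ∀ (i : Nat) (_ : i < k) (hil : i < cs.length), cs[i]'hil ≠ c := by
      intro i hik hil hci
      exact hmin i hik ⟨cs.drop (i+1), by rw [← hci]; simpa using (List.cons_getElem_drop_succ (l := cs) (i := i)).symm⟩
    have hfi : cs.findIdx (· = c) = k := by
      apply Nat.le_antisymm
      · by_contra hgt
        have : k < cs.findIdx (· = c) := by omega
        have h2 := List.not_of_lt_findIdx this
        simp at h2
        exact h2 hck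
      · by_contra hgt
        have hlt : cs.findIdx (· = c) < k := by omega
        have hfl : cs.findIdx (· = c) < cs.length := by omega
        have := @List.findIdx_getElem _ (· = c) cs hfl
        exact hne _ hlt hfl (by simpa using this)
    rw [hfi, hk]
    omega
  · rw [if_neg hm]
    exact (PySem.Chars.find_eq_neg_one_iff cs [c]).mpr
      (fun h => hm ((List.singleton_infix_iff c cs).mp h))

theorem pv_find_wild_ge (ns : List Char) (c : Char) (hw : pvWild c = true) :
    PySem.Chars.find ns [c] = -1 ∨
      ((ns.findIdx pvWild : Nat) : Int) ≤ PySem.Chars.find ns [c] := by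
  rw [pv_find_singleton]
  by_cases hm : c ∈ ns
  · right
    rw [if_pos hm]
    have hfl : ns.findIdx (· = c) < ns.length := by
      rw [List.findIdx_lt_length]; exact ⟨c, hm, by simp⟩
    have : ns.findIdx pvWild ≤ ns.findIdx (· = c) := by
      by_contra hgt
      have hlt : ns.findIdx (· = c) < ns.findIdx pvWild := by omega
      have h2 := List.not_of_lt_findIdx hlt
      have h3 := @List.findIdx_getElem _ (· = c) ns hfl
      simp at h3
      rw [← h3] at hw
      exact absurd (hw.symm.trans h2) (by simp)
    exact_mod_cast this
  · left; rw [if_neg hm]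

theorem pv_find_first (ns : List Char) (hlt : ns.findIdx pvWild < ns.length) :
    PySem.Chars.find ns ['*'] = ((ns.findIdx pvWild : Nat) : Int) ∨
    PySem.Chars.find ns ['?'] = ((ns.findIdx pvWild : Nat) : Int) ∨
    PySem.Chars.find ns ['['] = ((ns.findIdx pvWild : Nat) : Int) := by
  set t := ns.findIdx pvWild with ht
  have hwt : pvWild ns[t] = true := List.findIdx_getElem
  have hmem : ns[t] ∈ ns := List.getElem_mem hlt
  have hfi : ns.findIdx (· = ns[t]) = t := by
    apply Nat.le_antisymm
    · by_contra hgt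
      have h2 := List.not_of_lt_findIdx (p := (· = ns[t])) (xs := ns) (i := t) (by omega)
      simp at h2
      exact h2 rfl
    · by_contra hgt
      have hl2 : ns.findIdx (· = ns[t]) < ns.length := by
        have := List.findIdx_lt_length (p := (· = ns[t])) (xs := ns).mpr ⟨ns[t], hmem, by simp⟩
        omega
      have h3 := @List.findIdx_getElem _ (· = ns[t]) ns hl2
      simp at h3
      have h4 := List.not_of_lt_findIdx (p := pvWild) (xs := ns) (i := ns.findIdx (· = ns[t])) (by omega)
      have h5 : pvWild ns[t] = false := h3 ▸ h4
      exact absurd (hwt.symm.trans h5) (by simp)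
  have hfind : PySem.Chars.find ns [ns[t]] = ((t : Nat) : Int) := by
    rw [pv_find_singleton, if_pos hmem, hfi]
  have : (ns[t] = '*' ∨ ns[t] = '?') ∨ ns[t] = '[' := by
    simpa [pvWild] using hwt
  rcases this with (h | h) | h
  · left; rw [← h]; exact hfind
  · right; left; rw [← h]; exact hfind
  · right; right; rw [← h]; exact hfind

theorem pv_find_none (ns : List Char) (c : Char) (hw : pvWild c = true)
    (heq : ns.findIdx pvWild = ns.length) : PySem.Chars.find ns [c] = -1 := by
  rw [pv_find_singleton, if_neg]
  intro hm
  have := List.findIdx_eq_length.mp heq c hm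
  rw [hw] at this
  exact absurd this (by simp)

theorem pv_cut_eq (ns : List Char) :
    ([['*'], ['?'], ['[']] : List (List Char)).foldl
      (fun cut ch =>
        let idx := PySem.Chars.find ns ch
        if idx ≠ -1 ∧ idx < cut then idx else cut)
      ((ns.length : Nat) : Int)
    = ((ns.findIdx pvWild : Nat) : Int) := by
  simp only [List.foldl]
  have hle : ns.findIdx pvWild ≤ ns.length := List.findIdx_le_length
  have h1 := pv_find_wild_ge ns '*' (by decide)
  have h2 := pv_find_wild_ge ns '?' (by decide)
  have h3 := pv_find_wild_ge ns '[' (by decide)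
  by_cases hlt : ns.findIdx pvWild < ns.length
  · have h4 := pv_find_first ns hlt
    rcases h1 with h1 | h1 <;> rcases h2 with h2 | h2 <;> rcases h3 with h3 | h3 <;>
      rcases h4 with h4 | h4 | h4 <;> split_ifs <;> omega
  · have heq : ns.findIdx pvWild = ns.length := by omega
    rw [pv_find_none ns '*' (by decide) heq, pv_find_none ns '?' (by decide) heq,
        pv_find_none ns '[' (by decide) heq]
    split_ifs <;> omega

theorem pv_altLoop_nrm (cs : List Char) : ∀ (pre cur : List Char),
    pvAltLoop cs pre cur = pvAltLoop (cs.map pvNrm) pre cur := by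
  induction cs with
  | nil => intro pre cur; rfl
  | cons c rest ih =>
    intro pre cur
    by_cases hb : c = '\\'
    · subst hb
      simp [pvAltLoop, pvNrm, ih]
    · have hn : pvNrm c = c := by simp [pvNrm, hb]
      by_cases hs : c = '/'
      · subst hs; simp [pvAltLoop, pvNrm, ih]
      · by_cases hw : c = '*' ∨ c = '?' ∨ c = '['
        · simp [pvAltLoop, hn, hb, hs, hw]
        · simp [pvAltLoop, hn, hb, hs, hw, ih]

theorem pv_altLoop_spec (ns : List Char) : ∀ (pre cur : List Char), '\\' ∉ ns →
    pvAltLoop ns pre cur =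
      if '/' ∈ ns.takeWhile (fun c => !pvWild c) then
        pre ++ cur ++ ((ns.takeWhile (fun c => !pvWild c)).reverse.dropWhile (· ≠ '/')).reverse
      else pre := by
  induction ns with
  | nil => intro pre cur _; simp [pvAltLoop]
  | cons c rest ih =>
    intro pre cur hnb
    have hb : c ≠ '\\' := fun h => hnb (by simp [h])
    have hrest : '\\' ∉ rest := fun h => hnb (List.mem_cons_of_mem _ h)
    by_cases hs : c = '/'
    · subst hs
      have hP : (!pvWild '/') = true := by decide
      rw [show pvAltLoop ('/' :: rest) pre cur = pvAltLoop rest (pre ++ cur ++ ['/']) [] from by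
        simp [pvAltLoop]]
      rw [ih _ _ hrest]
      simp only [List.takeWhile_cons]
      rw [if_pos hP]
      set tw := rest.takeWhile (fun c => !pvWild c) with htw
      by_cases hm : '/' ∈ tw
      · rw [if_pos hm, if_pos (by simp [hm])]
        have hne : tw.reverse.dropWhile (· ≠ '/') ≠ [] := by
          rw [Ne, List.dropWhile_eq_nil_iff]
          push Not
          exact ⟨'/', by simp [hm], by simp⟩
        rw [List.reverse_cons, List.dropWhile_append]
        rw [if_neg (by simpa using hne)]
        simp
      · rw [if_neg hm, if_pos (by simp)]
        have hall : tw.reverse.dropWhile (· ≠ '/') = [] := by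
          rw [List.dropWhile_eq_nil_iff]
          intro x hx
          simp only [List.mem_reverse] at hx
          simp only [decide_eq_true_eq]
          exact fun h => hm (h ▸ hx)
        rw [List.reverse_cons, List.dropWhile_append, if_pos (by rw [hall]; rfl)]
        simp
    · by_cases hw : c = '*' ∨ c = '?' ∨ c = '['
      · rw [show pvAltLoop (c :: rest) pre cur = pre from by simp [pvAltLoop, hb, hs, hw]]
        have hP : ¬((!pvWild c) = true) := by
          rcases hw with h | h | h <;> simp [h, pvWild]
        simp only [List.takeWhile_cons]
        rw [if_neg hP]
        simp
      · have hP : (fun c => !pvWild c) c = true := by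
          push Not at hw
          simp [pvWild, hw.1, hw.2.1, hw.2.2]
        rw [show pvAltLoop (c :: rest) pre cur = pvAltLoop rest pre (cur ++ [c]) from by
          simp [pvAltLoop, hb, hs, hw]]
        rw [ih _ _ hrest]
        simp only [List.takeWhile_cons]
        rw [if_pos hP]
        set tw := rest.takeWhile (fun c => !pvWild c) with htw
        by_cases hm : '/' ∈ tw
        · rw [if_pos hm, if_pos (by simp [hm])]
          have hne : tw.reverse.dropWhile (· ≠ '/') ≠ [] := by
            rw [Ne, List.dropWhile_eq_nil_iff]
            push Not
            exact ⟨'/', by simp [hm], by simp⟩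
          rw [List.reverse_cons, List.dropWhile_append]
          rw [if_neg (by simpa using hne)]
          simp
        · rw [if_neg hm, if_neg (by simp [hm]; exact fun h => absurd h.symm hs)]

set_option maxHeartbeats 1000000 in
theorem glob_static_prefix_eq (glob : String) :
    glob_static_prefix glob = glob_static_prefix_alt glob := by
  simp only [glob_static_prefix, glob_static_prefix_alt]
  set cs := glob.toList with hcs
  set ns := cs.map pvNrm with hns
  set tw := ns.takeWhile (fun c => !pvWild c) with htw
  have hnorm : (PySem.Str.replace glob "\\" "/").toList = ns := by
    rw [PySem.Str.toList_replace]
    rw [show ("\\" : String).toList = ['\\'] from rfl,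
        show ("/" : String).toList = ['/'] from rfl]
    exact pv_replace_map cs
  have hlen : PySem.Str.len (PySem.Str.replace glob "\\" "/") = ((ns.length : Nat) : Int) := by
    rw [PySem.Str.len_eq, hnorm]
  have hfind : ∀ (c : Char) (s : String), s.toList = [c] →
      PySem.Str.find (PySem.Str.replace glob "\\" "/") s = PySem.Chars.find ns [c] := by
    intro c s hsc
    rw [PySem.Str.find_eq, hnorm, hsc]
  have hfold :
      (["*", "?", "["] : List String).foldl
        (fun cut ch =>
          let idx := PySem.Str.find (PySem.Str.replace glob "\\" "/") ch
          if idx ≠ -1 ∧ idx < cut then idx else cut)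
        (PySem.Str.len (PySem.Str.replace glob "\\" "/"))
      = ((ns.findIdx pvWild : Nat) : Int) := by
    rw [← pv_cut_eq ns]
    simp only [List.foldl, hlen, hfind '*' "*" rfl, hfind '?' "?" rfl, hfind '[' "[" rfl]
  have hhead : (PySem.Str.slice (PySem.Str.replace glob "\\" "/") none
      (some (((ns.findIdx pvWild : Nat) : Int)))).toList = tw := by
    rw [PySem.Str.toList_slice]
    simp only [PySem.Chars.slice_eq_listSlice, hnorm]
    rw [PySem.List.slice_to_natCast]
    rw [htw, List.takeWhile_eq_take_findIdx_not]
    have hpred : (List.findIdx (fun a => !(fun c => !pvWild c) a) ns) = List.findIdx pvWild ns := by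
      congr 1
      funext a
      simp
    rw [hpred]
  have hnb : '\\' ∉ ns := by
    rw [hns]
    intro hm
    rcases List.mem_map.mp hm with ⟨a, _, ha⟩
    by_cases h : a = '\\' <;> simp [pvNrm, h] at ha
  have halt : pvAltLoop cs [] [] =
      if '/' ∈ tw then (tw.reverse.dropWhile (· ≠ '/')).reverse else [] := by
    rw [pv_altLoop_nrm, ← hns, pv_altLoop_spec ns [] [] hnb, ← htw]
    split_ifs <;> simp
  rw [hfold, halt]
  by_cases hm : '/' ∈ tw
  · have hin : PySem.Str.isIn "/" (PySem.Str.slice (PySem.Str.replace glob "\\" "/") none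
        (some (((ns.findIdx pvWild : Nat) : Int)))) = true := by
      rw [PySem.Str.isIn_eq, hhead]
      rw [PySem.Chars.isIn_iff_infix]
      rw [show ("/" : String).toList = ['/'] from rfl]
      exact (List.singleton_infix_iff _ _).mpr hm
    rw [if_pos hin, if_pos hm, hhead]
    refine congrArg String.ofList ?_
    -- keep = beforeLast ++ ['/']
    set r := tw.reverse.dropWhile (· ≠ '/') with hr
    have hne : r ≠ [] := by
      rw [hr, Ne, List.dropWhile_eq_nil_iff]
      push Not
      exact ⟨'/', by simp [hm], by simp⟩
    have hhd : r.head hne = '/' := by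
      have h1 := List.head_dropWhile_not (fun x => decide (x ≠ '/')) (l := tw.reverse)
        hne
      have h2 : ¬(r.head hne ≠ '/') := of_decide_eq_false h1
      exact not_not.mp h2
    conv_rhs => rw [← List.cons_head_tail hne, hhd]
    simp
  · have hin : PySem.Str.isIn "/" (PySem.Str.slice (PySem.Str.replace glob "\\" "/") none
        (some (((ns.findIdx pvWild : Nat) : Int)))) = false := by
      rw [PySem.Str.isIn_eq, hhead]
      rw [show ("/" : String).toList = ['/'] from rfl]
      rw [← Bool.not_eq_true, PySem.Chars.isIn_iff_infix]
      exact fun h => hm ((List.singleton_infix_iff _ _).mp h)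
    have hinne : ¬ (PySem.Str.isIn "/" (PySem.Str.slice (PySem.Str.replace glob "\\" "/") none
        (some (((ns.findIdx pvWild : Nat) : Int)))) = true) := by
      rw [hin]; simp
    rw [if_neg hinne, if_neg hm]

-- ===== VERDICT (by name: the statement is the Claim_ definition above) =====
theorem glob_static_prefix_spec : Claim_equal_glob_static_prefix := by
  intro glob _
  unfold Spec_glob_static_prefix
  exact glob_static_prefix_eq glob
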